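-- pv_equiv track=rewrite | github.com/rkernutt/OpenSearch-migration | validate_migration.py | distribute_sample_sizes
-- ===== SOURCE A (Python) =====
-- from typing import Any, Dict, List, Optional, Tuple
--
-- def distribute_sample_sizes(total: int, num_slices: int) -> List[int]:
--     """Split total across num_slices (each gets floor/ceil so sums to total)."""
--     if num_slices < 1:
--         raise ValueError("num_slices must be >= 1")
--     if total < 0:
--         raise ValueError("total must be >= 0")
--     base = total // num_slices
--     rem = total % num_slices
--     return [base + (1 if i < rem else 0) for i in range(num_slices)]
-- ===== SOURCE B (Python) =====
-- from typing import List
--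
-- def distribute_sample_sizes(total: int, num_slices: int) -> List[int]:
--     """Split total across num_slices (each gets floor/ceil so sums to total)."""
--     if num_slices < 1:
--         raise ValueError("num_slices must be >= 1")
--     if total < 0:
--         raise ValueError("total must be >= 0")
--     sizes = []
--     remaining = total
--     for slices_left in range(num_slices, 0, -1):
--         part = -(-remaining // slices_left)  # ceil division of what is left
--         sizes.append(part)
--         remaining -= part
--     return sizes
-- ===== Notes on version B (the rewrite author's own statement) =====
-- stated objective: alternative
-- what changed: Instead of computing base/rem once with divmod and emitting a per-index conditional, B runs a greedy single pass that at each step ceil-divides the remaining total by the slices left and subtracts, maintaining a running remainder.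
import Mathlib
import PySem

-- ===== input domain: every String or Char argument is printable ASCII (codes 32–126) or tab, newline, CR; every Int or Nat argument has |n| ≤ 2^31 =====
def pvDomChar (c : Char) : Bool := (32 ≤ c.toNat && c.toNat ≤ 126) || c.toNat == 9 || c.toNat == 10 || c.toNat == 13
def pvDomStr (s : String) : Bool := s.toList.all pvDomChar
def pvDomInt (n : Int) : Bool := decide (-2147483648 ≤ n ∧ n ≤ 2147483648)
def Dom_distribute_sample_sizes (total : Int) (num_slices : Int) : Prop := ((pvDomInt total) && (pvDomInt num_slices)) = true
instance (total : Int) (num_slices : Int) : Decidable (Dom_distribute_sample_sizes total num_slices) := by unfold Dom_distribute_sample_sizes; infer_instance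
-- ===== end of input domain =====

-- B replaces the divmod-once + per-index-conditional comprehension by a greedy single
-- pass: ceil-divide the remaining total by the slices left, subtract, repeat
-- (objective: alternative; same cost).

-- ===== PORT A =====
-- [base + (1 if i < rem else 0) for i in range(num_slices)]
def distribute_sample_sizes (total : Int) (num_slices : Int) : List Int :=
  let base := PySem.Int.floordiv total num_slices
  let rem := PySem.Int.mod total num_slices
  (PySem.List.pyRange 0 num_slices 1).map (fun i => base + (if i < rem then 1 else 0))

-- ===== PORT B =====
-- for slices_left in range(num_slices, 0, -1): part = -(-remaining // slices_left); append; remaining -= part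
def greedyParts : Nat → Int → List Int
  | 0, _ => []
  | k+1, remaining =>
      let part := -(PySem.Int.floordiv (-remaining) ((k : Int) + 1))
      part :: greedyParts k (remaining - part)

def distribute_sample_sizes_alt (total : Int) (num_slices : Int) : List Int :=
  greedyParts num_slices.toNat total

-- ===== PRECONDITION & SPEC =====
-- A raises ValueError when num_slices < 1 or total < 0; exactly those inputs are excluded.
def Pre_distribute_sample_sizes (total : Int) (num_slices : Int) : Prop :=
  1 ≤ num_slices ∧ 0 ≤ total
instance (total : Int) (num_slices : Int) : Decidable (Pre_distribute_sample_sizes total num_slices) := by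
  unfold Pre_distribute_sample_sizes; infer_instance

def pvWitness_distribute_sample_sizes : Int × Int := (7, 3)

def Spec_distribute_sample_sizes (total : Int) (num_slices : Int) (out : List Int) : Prop :=
  out = distribute_sample_sizes_alt total num_slices
instance (total : Int) (num_slices : Int) (out : List Int) : Decidable (Spec_distribute_sample_sizes total num_slices out) := by
  unfold Spec_distribute_sample_sizes; infer_instance

-- ===== CLAIM =====
def Claim_equal_distribute_sample_sizes : Prop := ∀ (total : Int) (num_slices : Int), Dom_distribute_sample_sizes total num_slices → Pre_distribute_sample_sizes total num_slices → Spec_distribute_sample_sizes total num_slices (distribute_sample_sizes total num_slices)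

-- ===== LEMMAS AND PROOFS =====

-- A range comprehension whose conditional flips once at r is two constant segments.
theorem map_range_ite_eq_replicate (b : Int) (r k : Nat) (hr : r ≤ k) :
    (List.range k).map (fun i : Nat => b + (if (i : Int) < (r : Int) then 1 else 0))
      = List.replicate r (b + 1) ++ List.replicate (k - r) b := by
  induction k with
  | zero =>
    have : r = 0 := Nat.le_zero.mp hr
    simp [this]
  | succ k ih =>
    rcases Nat.lt_or_ge r (k + 1) with h | h
    · have hrk : r ≤ k := Nat.lt_succ_iff.mp h
      rw [List.range_succ, List.map_append, ih hrk]
      simp [Nat.not_lt.mpr hrk, List.append_assoc]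
      rw [show k + 1 - r = (k - r) + 1 from by omega, List.replicate_succ']
    · have hreq : r = k + 1 := Nat.le_antisymm hr h
      subst hreq
      have hall : ∀ i ∈ List.range (k + 1),
          b + (if (i : Int) < ((k + 1 : Nat) : Int) then 1 else 0) = b + 1 := by
        intro i hi
        have h1 : i ≤ k := Nat.lt_succ_iff.mp (List.mem_range.mp hi)
        simp [h1]
      rw [List.map_congr_left hall]
      simp

-- The greedy ceil-division pass on b*k + r (0 ≤ r ≤ k) yields the same two segments.
theorem greedyParts_eq (b : Int) : ∀ (k r : Nat), r ≤ k →
    greedyParts k (b * (k : Int) + (r : Int))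
      = List.replicate r (b + 1) ++ List.replicate (k - r) b := by
  intro k
  induction k with
  | zero =>
    intro r hr
    have : r = 0 := Nat.le_zero.mp hr
    simp [this, greedyParts]
  | succ k ih =>
    intro r hr
    have hm : (0 : Int) < (k : Int) + 1 := by positivity
    rcases r with _ | s
    · -- r = 0 : the slice gets exactly b
      have hpart : -(PySem.Int.floordiv (-(b * ((k : Int) + 1) + 0)) ((k : Int) + 1)) = b := by
        rw [PySem.Int.neg_floordiv_neg_eq_iff_of_pos hm]
        constructor <;> nlinarith
      simp only [greedyParts, Nat.cast_add, Nat.cast_one, Nat.cast_zero] at *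
      rw [hpart]
      have hrem : b * ((k : Int) + 1) + 0 - b = b * (k : Int) + ((0 : Nat) : Int) := by push_cast; ring
      rw [hrem, ih 0 (Nat.zero_le k)]
      simp [List.replicate_succ]
    · -- r = s+1 > 0 : the slice gets b+1
      have hs : s ≤ k := Nat.succ_le_succ_iff.mp hr
      have hpart : -(PySem.Int.floordiv (-(b * ((k : Int) + 1) + ((s : Int) + 1))) ((k : Int) + 1))
          = b + 1 := by
        rw [PySem.Int.neg_floordiv_neg_eq_iff_of_pos hm]
        constructor
        · nlinarith
        · have : (s : Int) + 1 ≤ (k : Int) + 1 := by exact_mod_cast Nat.succ_le_succ hs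
          nlinarith
      simp only [greedyParts, Nat.cast_add, Nat.cast_one] at *
      rw [hpart]
      have hrem : b * ((k : Int) + 1) + ((s : Int) + 1) - (b + 1) = b * (k : Int) + (s : Int) := by
        ring
      rw [hrem, ih s hs]
      have : k + 1 - (s + 1) = k - s := by omega
      simp [this, List.replicate_succ]

theorem distribute_sample_sizes_spec : Claim_equal_distribute_sample_sizes := by
  intro total num_slices _ hpre
  obtain ⟨hn, ht⟩ := hpre
  unfold Spec_distribute_sample_sizes distribute_sample_sizes distribute_sample_sizes_alt
  simp only
  set base := PySem.Int.floordiv total num_slices with hbase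
  set rem := PySem.Int.mod total num_slices with hrem
  have hnpos : (0 : Int) < num_slices := by omega
  have hr0 : 0 ≤ rem := PySem.Int.mod_nonneg total hnpos
  have hr1 : rem < num_slices := PySem.Int.mod_lt total hnpos
  have htotal : base * num_slices + rem = total := PySem.Int.floordiv_mul_add_mod total num_slices
  -- A side → two segments
  rw [PySem.List.pyRange_one, List.map_map]
  have hk : (num_slices - 0).toNat = num_slices.toNat := by simp
  rw [hk]
  have hcast_r : ((rem.toNat : Nat) : Int) = rem := Int.toNat_of_nonneg hr0
  have hcast_n : ((num_slices.toNat : Nat) : Int) = num_slices := Int.toNat_of_nonneg (le_of_lt hnpos)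
  have hle : rem.toNat ≤ num_slices.toNat := by omega
  have hmain := map_range_ite_eq_replicate base rem.toNat num_slices.toNat hle
  rw [hcast_r] at hmain
  have hfun : ((fun i => base + (if i < rem then 1 else 0)) ∘ fun k : Nat => (0 : Int) + k)
      = fun i : Nat => base + (if (i : Int) < rem then 1 else 0) := by
    funext i; simp
  rw [hfun, hmain]
  -- B side → the same two segments
  have hgreedy := greedyParts_eq base num_slices.toNat rem.toNat hle
  rw [hcast_n, hcast_r] at hgreedy
  rw [htotal] at hgreedy
  rw [hgreedy]
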